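-- pv_equiv track=rewrite | github.com/ObviouslyN0tMe/AdventOfCode | puzzle 4/puzzle 4.py | validatePid
-- ===== SOURCE A (Python) =====
-- def validatePid(fieldcontent):
--     valid = False
--     if len(fieldcontent) == 9:
--         for x in range(0, 10, 1):
--             fieldcontent = fieldcontent.replace(str(x), "")
--         if len(fieldcontent) == 0:
--             valid = True
--     return valid
-- ===== SOURCE B (Python) =====
-- def validatePid(fieldcontent):
--     return len(fieldcontent) == 9 and all(c in '0123456789' for c in fieldcontent)
-- ===== Notes on version B (the rewrite author's own statement) =====
-- stated objective: simpler
-- what changed: Replaces A's ten successive str.replace passes (one per digit value) followed by a length check with a single guarded pass testing each character's membership in a literal ten-digit set.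
import Mathlib
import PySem

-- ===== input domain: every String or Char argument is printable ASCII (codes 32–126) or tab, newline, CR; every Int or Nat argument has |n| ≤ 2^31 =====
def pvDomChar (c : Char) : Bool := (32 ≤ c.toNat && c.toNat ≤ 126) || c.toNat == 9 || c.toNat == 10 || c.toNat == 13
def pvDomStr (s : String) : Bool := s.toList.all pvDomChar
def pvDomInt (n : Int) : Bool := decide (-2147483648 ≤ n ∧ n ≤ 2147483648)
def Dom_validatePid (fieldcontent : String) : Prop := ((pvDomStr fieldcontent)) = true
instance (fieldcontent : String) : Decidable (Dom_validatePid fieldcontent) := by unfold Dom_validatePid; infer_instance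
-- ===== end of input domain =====

-- B replaces A's ten successive str.replace passes with one guarded pass testing each
-- character's membership in a literal ten-digit set (objective: simpler).

-- ===== PORT A =====
def validatePid (fieldcontent : String) : Bool :=
  let valid := false
  if PySem.Str.len fieldcontent = 9 then
    let fc := (PySem.List.pyRange 0 10 1).foldl
      (fun s x => PySem.Str.replace s (PySem.Int.toStr x) "") fieldcontent
    if PySem.Str.len fc = 0 then true else valid
  else valid

-- ===== PORT B =====
def validatePid_alt (fieldcontent : String) : Bool :=
  decide (PySem.Str.len fieldcontent = 9) &&
    fieldcontent.toList.all (fun c => PySem.Chars.isIn [c] "0123456789".toList)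

-- ===== PRECONDITION & SPEC =====
def Spec_validatePid (fieldcontent : String) (out : Bool) : Prop := out = validatePid_alt fieldcontent
instance (fieldcontent : String) (out : Bool) : Decidable (Spec_validatePid fieldcontent out) := by unfold Spec_validatePid; infer_instance

-- ===== CLAIM (what is proved, stated in full; the proofs are below) =====
def Claim_equal_validatePid : Prop := ∀ (fieldcontent : String), Dom_validatePid fieldcontent → Spec_validatePid fieldcontent (validatePid fieldcontent)

-- ===== LEMMAS AND PROOFS =====

-- replace.go with a single-char pattern and empty replacement is a filter
theorem go_single (d : Char) : ∀ (fuel : Nat) (l acc : List Char), l.length ≤ fuel →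
    PySem.Chars.replace.go [d] [] fuel l acc = acc.reverse ++ l.filter (fun c => c != d) := by
  intro fuel
  induction fuel with
  | zero => intro l acc h; cases l with
    | nil => simp [PySem.Chars.replace.go]
    | cons c t => simp at h
  | succ n ih =>
    intro l acc h
    cases l with
    | nil => simp [PySem.Chars.replace.go]
    | cons c t =>
      rw [PySem.Chars.replace.go]
      by_cases hc : c = d
      · subst hc
        have hp : List.isPrefixOf [c] (c :: t) = true := by simp [List.isPrefixOf]
        simp only [hp, if_pos, List.drop, List.length, List.reverse_nil, List.nil_append]
        rw [ih t acc (by simpa using h)]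
        simp
      · have hp : List.isPrefixOf [d] (c :: t) = false := by
          simp [List.isPrefixOf]; exact fun h' => absurd h'.symm hc
        simp only [hp, Bool.false_eq_true, if_neg, not_false_iff]
        rw [ih t (c :: acc) (by simpa using Nat.le_of_succ_le_succ h)]
        simp [hc]

theorem replace_single (d : Char) (l : List Char) :
    PySem.Chars.replace l [d] [] = l.filter (fun c => c != d) := by
  rw [PySem.Chars.replace]
  simp only [List.isEmpty_cons, Bool.false_eq_true, if_neg, not_false_iff]
  exact go_single d l.length l [] (le_refl _)

theorem singleton_infix_iff (c : Char) (l : List Char) : [c] <:+: l ↔ c ∈ l := by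
  constructor
  · intro h; exact List.singleton_sublist.mp h.sublist
  · intro h
    obtain ⟨s, t, rfl⟩ := List.append_of_mem h
    exact ⟨s, t, by simp⟩

theorem isIn_digits (c : Char) :
    PySem.Chars.isIn [c] "0123456789".toList = decide (c ∈ "0123456789".toList) := by
  by_cases h : c ∈ "0123456789".toList
  · have h1 : PySem.Chars.isIn [c] "0123456789".toList = true :=
      (PySem.Chars.isIn_iff_infix _ _).mpr ((singleton_infix_iff c _).mpr h)
    rw [h1, decide_eq_true h]
  · simp only [h, decide_false]
    by_contra hne
    have : PySem.Chars.isIn [c] "0123456789".toList = true := by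
      cases hb : PySem.Chars.isIn [c] "0123456789".toList
      · exact absurd hb hne
      · rfl
    exact h ((singleton_infix_iff c _).mp ((PySem.Chars.isIn_iff_infix _ _).mp this))

theorem toList_fold : ∀ (xs : List Int), (∀ x ∈ xs, 0 ≤ x ∧ x < 10) → ∀ (s : String),
    ((xs.foldl (fun t x => PySem.Str.replace t (PySem.Int.toStr x) "") s).toList
      = xs.foldl (fun t x => t.filter (fun c => c != Char.ofNat (48 + x.toNat))) s.toList) := by
  intro xs
  induction xs with
  | nil => intro _ s; simp
  | cons x xs ih =>
    intro hb s
    have hx := hb x (by simp)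
    have hstr : (PySem.Int.toStr x).toList = [Char.ofNat (48 + x.toNat)] := by
      obtain ⟨hx1, hx2⟩ := hx
      interval_cases x <;> decide
    simp only [List.foldl_cons]
    rw [ih (fun y hy => hb y (by simp [hy])), PySem.Str.toList_replace, hstr]
    have he : ("" : String).toList = [] := rfl
    rw [he, replace_single]

theorem mem_foldl_filter {β : Type} (f : β → Char) : ∀ (ds : List β) (l : List Char) (c : Char),
    (c ∈ ds.foldl (fun t d => t.filter (fun a => a != f d)) l ↔ c ∈ l ∧ ∀ d ∈ ds, c ≠ f d) := by
  intro ds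
  induction ds with
  | nil => intro l c; simp
  | cons d ds ih =>
    intro l c
    simp only [List.foldl_cons]
    rw [ih]
    simp only [List.mem_filter, bne_iff_ne, ne_eq, List.mem_cons]
    constructor
    · rintro ⟨⟨hl, hd⟩, hds⟩
      refine ⟨hl, fun e he => ?_⟩
      rcases he with rfl | he
      · exact hd
      · exact hds e he
    · rintro ⟨hl, h⟩
      exact ⟨⟨hl, h d (Or.inl rfl)⟩, fun e he => h e (Or.inr he)⟩

-- the characters a char survives A's ten replaces iff it is no ASCII digit
theorem fold_nil_iff (l : List Char) :
    ([0,1,2,3,4,5,6,7,8,9].foldl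
        (fun t (x : Int) => t.filter (fun c => c != Char.ofNat (48 + x.toNat))) l = []
      ↔ ∀ c ∈ l, c ∈ "0123456789".toList) := by
  rw [List.eq_nil_iff_forall_not_mem]
  constructor
  · intro h c hc
    have := h c
    rw [mem_foldl_filter] at this
    by_contra hmem
    apply this
    refine ⟨hc, fun d hd he => hmem ?_⟩
    subst he
    fin_cases hd <;> decide
  · intro h c
    rw [mem_foldl_filter]
    rintro ⟨hc, hall⟩
    have hmem := h c hc
    rw [show "0123456789".toList = ['0','1','2','3','4','5','6','7','8','9'] from by decide] at hmem
    simp only [List.mem_cons] at hmem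
    rcases hmem with rfl|rfl|rfl|rfl|rfl|rfl|rfl|rfl|rfl|rfl|hmem
    · exact hall 0 (by simp) (by decide)
    · exact hall 1 (by simp) (by decide)
    · exact hall 2 (by simp) (by decide)
    · exact hall 3 (by simp) (by decide)
    · exact hall 4 (by simp) (by decide)
    · exact hall 5 (by simp) (by decide)
    · exact hall 6 (by simp) (by decide)
    · exact hall 7 (by simp) (by decide)
    · exact hall 8 (by simp) (by decide)
    · exact hall 9 (by simp) (by decide)
    · simp at hmem

-- ===== VERDICT (by name: the statement is the Claim_ definition above) =====
theorem validatePid_spec : Claim_equal_validatePid := by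
  intro s _
  unfold Spec_validatePid validatePid validatePid_alt
  by_cases h9 : PySem.Str.len s = 9
  · simp only [h9, if_pos, decide_true, Bool.true_and]
    have hrange : PySem.List.pyRange 0 10 1 = [0,1,2,3,4,5,6,7,8,9] := by decide
    rw [hrange]
    have hfcl := toList_fold [0,1,2,3,4,5,6,7,8,9] (by decide) s
    rw [PySem.Str.len_eq, hfcl]
    by_cases hall : ∀ c ∈ s.toList, c ∈ "0123456789".toList
    · have hnil := (fold_nil_iff s.toList).mpr hall
      rw [hnil]
      simp only [List.length_nil, Nat.cast_zero, if_pos]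
      symm
      rw [List.all_eq_true]
      intro c hc
      rw [isIn_digits]
      exact decide_eq_true (hall c hc)
    · have hnnil : ¬ ([0,1,2,3,4,5,6,7,8,9].foldl
          (fun t (x : Int) => t.filter (fun c => c != Char.ofNat (48 + x.toNat))) s.toList = []) :=
        fun h => hall ((fold_nil_iff s.toList).mp h)
      rw [if_neg (by simpa [List.length_eq_zero_iff] using hnnil)]
      symm
      rw [Bool.eq_false_iff]
      intro hb
      apply hall
      intro c hc
      have := (List.all_eq_true.mp hb) c hc
      rw [isIn_digits] at this
      exact of_decide_eq_true this
  · rw [if_neg h9, decide_eq_false h9, Bool.false_and]
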